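-- pv_equiv track=rewrite | github.com/crixodia/aoc | 2023/08_haunted_wasteland/main.py | solve
-- ===== SOURCE A (Python) =====
-- def solve(dirs, inst, current_node="AAA", target_node="ZZZ"):
--     steps = 0
--
--     for d in dirs:
--         if current_node == target_node:
--             return steps
--
--         steps += 1
--         current_node = inst[current_node][d]
--
--     return steps + solve(dirs, inst, current_node, target_node)
-- ===== SOURCE B (Python) =====
-- def solve(dirs, inst, current_node="AAA", target_node="ZZZ"):
--     steps = 0
--     n = len(dirs)
--     while current_node != target_node:
--         current_node = inst[current_node][dirs[steps % n]]
--         steps += 1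
--     return steps
-- ===== Notes on version B (the rewrite author's own statement) =====
-- stated objective: idiomatic
-- what changed: Replaces A's recursion-wrapping-a-for-loop (restarting the direction list by a recursive call that re-adds step counts) with a single flat while-loop that indexes the repeating direction list by steps % len(dirs).
-- crash fix: When dirs is empty and current_node == target_node, A recurses forever (RecursionError) because its target check sits inside the for loop, while B returns 0. — e.g. on solve([], [], "AAA", "AAA"): A raises RecursionError, B returns 0
import Mathlib
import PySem

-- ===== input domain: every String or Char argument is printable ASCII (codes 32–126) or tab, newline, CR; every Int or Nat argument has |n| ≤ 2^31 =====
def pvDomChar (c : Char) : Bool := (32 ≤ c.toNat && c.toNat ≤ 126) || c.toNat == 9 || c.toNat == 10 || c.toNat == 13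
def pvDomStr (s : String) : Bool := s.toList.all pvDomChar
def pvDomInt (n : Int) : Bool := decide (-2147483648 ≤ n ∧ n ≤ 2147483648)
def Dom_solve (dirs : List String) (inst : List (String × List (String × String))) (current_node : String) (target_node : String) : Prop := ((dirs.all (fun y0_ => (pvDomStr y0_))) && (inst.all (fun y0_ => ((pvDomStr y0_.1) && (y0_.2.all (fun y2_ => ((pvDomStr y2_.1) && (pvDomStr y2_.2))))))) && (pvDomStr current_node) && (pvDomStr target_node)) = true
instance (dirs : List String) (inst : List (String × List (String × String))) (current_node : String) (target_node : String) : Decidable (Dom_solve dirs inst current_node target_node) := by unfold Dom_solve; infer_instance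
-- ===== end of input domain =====

-- B replaces A's recursion-around-a-for-loop with one flat while loop indexing dirs by steps % len(dirs) (idiomatic; same cost).
-- Both ports use fuel only to be total in Lean: under Pre_solve (the walk reaches the target within the state-space bound,
-- outside of which the Python A raises KeyError or RecursionError) the fuel is never exhausted.

-- ===== PORT A =====
-- the 'for d in dirs' loop: Sum.inl = early 'return steps', Sum.inr = loop fell through with (steps, current_node)
def solveInner (inst : List (String × List (String × String))) (target_node : String) :
    List String → String → Int → Sum Int (Int × String)
  | [], cur, steps => .inr (steps, cur)
  | d :: ds, cur, steps =>
    if cur == target_node then .inl steps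
    else
      match ((PySem.Dict.mk inst).get? cur).bind (fun row => (PySem.Dict.mk row).get? d) with
      | none => .inl steps            -- Python raises KeyError here; unreachable under Pre_solve
      | some nxt => solveInner inst target_node ds nxt (steps + 1)

-- 'return steps + solve(...)': the tail recursion, with fuel making it total
def solveRec (dirs : List String) (inst : List (String × List (String × String))) (target_node : String) :
    Nat → String → Int
  | 0, _ => 0                          -- fuel exhausted: Python diverges (RecursionError); unreachable under Pre_solve
  | fuel + 1, cur =>
    match solveInner inst target_node dirs cur 0 with
    | .inl s => s
    | .inr (s, c) => s + solveRec dirs inst target_node fuel c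

def solve (dirs : List String) (inst : List (String × List (String × String))) (current_node : String) (target_node : String) : Int :=
  solveRec dirs inst target_node ((inst.length + 1) * dirs.length + 2) current_node

-- ===== PORT B =====
-- the 'while current_node != target_node' loop, with fuel making it total
def solveLoop (dirs : List String) (inst : List (String × List (String × String))) (target_node : String) :
    Nat → Int → String → Int
  | 0, steps, _ => steps               -- fuel exhausted: Python diverges; unreachable under Pre_solve
  | fuel + 1, steps, cur =>
    if cur == target_node then steps
    else
      match ((PySem.Dict.mk inst).get? cur).bind
              (fun row => (PySem.Dict.mk row).get?
                (PySem.List.pyGetD dirs (PySem.Int.mod steps (dirs.length : Int)) "")) with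
      | none => steps                  -- Python raises KeyError/ZeroDivisionError here; unreachable under Pre_solve
      | some nxt => solveLoop dirs inst target_node fuel (steps + 1) nxt

def solve_alt (dirs : List String) (inst : List (String × List (String × String))) (current_node : String) (target_node : String) : Int :=
  solveLoop dirs inst target_node ((inst.length + 1) * dirs.length + 1) 0 current_node

-- ===== PRECONDITION & SPEC =====
-- one step of the walk: inst[cur][d] (spec helper, used only by Pre_solve and the proofs)
def wstep (inst : List (String × List (String × String))) (cur d : String) : Option String :=
  ((PySem.Dict.mk inst).get? cur).bind (fun row => (PySem.Dict.mk row).get? d)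

-- the node after k steps of the walk (none once a lookup failed)
def nodeAt (dirs : List String) (inst : List (String × List (String × String))) (c0 : String) : Nat → Option String
  | 0 => some c0
  | k + 1 => (nodeAt dirs inst c0 k).bind (fun n => wstep inst n (dirs.getD (k % dirs.length) ""))

-- A returns a value exactly when dirs is nonempty and the walk reaches the target; on all other inputs the Python A raises
-- (KeyError on a failed lookup, RecursionError on a walk that never reaches the target — including dirs = []).
-- Reaching the target is inherently a reachability condition; by pigeonhole on the (node, position) state space a terminating
-- walk first hits the target within (|inst|+1)*|dirs| steps, which bounds the search and makes Pre_ decidable.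
def Pre_solve (dirs : List String) (inst : List (String × List (String × String))) (current_node : String) (target_node : String) : Prop :=
  dirs ≠ [] ∧ ∃ k ∈ List.range ((inst.length + 1) * dirs.length + 1), nodeAt dirs inst current_node k = some target_node
instance (dirs : List String) (inst : List (String × List (String × String))) (current_node : String) (target_node : String) : Decidable (Pre_solve dirs inst current_node target_node) := by unfold Pre_solve; infer_instance

def pvWitness_solve : List String × (List (String × List (String × String))) × String × String :=
  (["L"], [("AAA", [("L", "ZZZ")])], "AAA", "ZZZ")

-- When dirs is empty and current_node == target_node, A recurses forever (RecursionError) because its target check sits inside the for loop, while B returns 0.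
def Raises_solve (dirs : List String) (inst : List (String × List (String × String))) (current_node : String) (target_node : String) : Prop :=
  dirs = [] ∧ current_node = target_node
instance (dirs : List String) (inst : List (String × List (String × String))) (current_node : String) (target_node : String) : Decidable (Raises_solve dirs inst current_node target_node) := by unfold Raises_solve; infer_instance
def pvRaiseWitness_solve : List String × (List (String × List (String × String))) × String × String :=
  ([], [], "AAA", "AAA")
def pvRaiseWitnessOut_solve : Int := 0

def Spec_solve (dirs : List String) (inst : List (String × List (String × String))) (current_node : String) (target_node : String) (out : Int) : Prop := out = solve_alt dirs inst current_node target_node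
instance (dirs : List String) (inst : List (String × List (String × String))) (current_node : String) (target_node : String) (out : Int) : Decidable (Spec_solve dirs inst current_node target_node out) := by unfold Spec_solve; infer_instance

-- ===== CLAIM (what is proved, stated in full; the proofs are below) =====
def Claim_equal_solve : Prop := ∀ (dirs : List String) (inst : List (String × List (String × String))) (current_node : String) (target_node : String), Dom_solve dirs inst current_node target_node → Pre_solve dirs inst current_node target_node → Spec_solve dirs inst current_node target_node (solve dirs inst current_node target_node)
def Claim_raises_solve : Prop := (∀ (dirs : List String) (inst : List (String × List (String × String))) (current_node : String) (target_node : String), Dom_solve dirs inst current_node target_node → Raises_solve dirs inst current_node target_node → ¬ Pre_solve dirs inst current_node target_node) ∧ (Dom_solve (pvRaiseWitness_solve.1) (pvRaiseWitness_solve.2.1) (pvRaiseWitness_solve.2.2.1) (pvRaiseWitness_solve.2.2.2) ∧ Raises_solve (pvRaiseWitness_solve.1) (pvRaiseWitness_solve.2.1) (pvRaiseWitness_solve.2.2.1) (pvRaiseWitness_solve.2.2.2) ∧ solve_alt (pvRaiseWitness_solve.1) (pvRaiseWitness_solve.2.1) (pvRaiseWitness_solve.2.2.1) (pvRaiseWitness_solve.2.2.2)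 = pvRaiseWitnessOut_solve)

-- ===== LEMMAS AND PROOFS =====

theorem nodeAt_none_mono (dirs : List String) (inst : List (String × List (String × String))) (c0 : String)
    {i j : Nat} (hij : i ≤ j) (h : nodeAt dirs inst c0 i = none) : nodeAt dirs inst c0 j = none := by
  induction j with
  | zero =>
    have : i = 0 := by omega
    subst this; exact h
  | succ j ih =>
    rcases Nat.lt_or_ge i (j + 1) with hlt | hge
    · have := ih (by omega)
      simp [nodeAt, this]
    · have : i = j + 1 := by omega
      subst this; exact h

theorem nodeAt_isSome_of_le (dirs : List String) (inst : List (String × List (String × String))) (c0 : String)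
    {i j : Nat} (hij : i ≤ j) {t : String} (h : nodeAt dirs inst c0 j = some t) :
    ∃ x, nodeAt dirs inst c0 i = some x := by
  cases hx : nodeAt dirs inst c0 i with
  | some x => exact ⟨x, rfl⟩
  | none => rw [nodeAt_none_mono dirs inst c0 hij hx] at h; cases h

theorem innerA_eq (dirs : List String) (inst : List (String × List (String × String))) (c0 target_node : String)
    (m : Nat) (hm : nodeAt dirs inst c0 m = some target_node)
    (hmin : ∀ j < m, nodeAt dirs inst c0 j ≠ some target_node) :
    ∀ (suf : List String) (k j : Nat) (cur : String),
      (∀ t < suf.length, suf.getD t "" = dirs.getD ((k + t) % dirs.length) "") →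
      nodeAt dirs inst c0 k = some cur → k ≤ m →
      solveInner inst target_node suf cur (j : Int) =
        if m < k + suf.length then Sum.inl ((j + (m - k) : Nat) : Int)
        else Sum.inr (((j + suf.length : Nat) : Int), (nodeAt dirs inst c0 (k + suf.length)).getD "") := by
  intro suf
  induction suf with
  | nil =>
    intro k j cur _ hnode hkm
    simp [solveInner, hnode]
    exact hkm
  | cons d rest ih =>
    intro k j cur hd hnode hkm
    by_cases hcur : cur = target_node
    · subst hcur
      have hmk : m = k := by
        by_contra hne
        have hklt : k < m := by omega
        exact hmin k hklt hnode
      subst hmk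
      simp [solveInner]
    · have hknem : k ≠ m := by
        intro h; subst h; rw [hm] at hnode; exact hcur (Option.some.inj hnode).symm
      have hklt : k < m := by omega
      have hd0 : d = dirs.getD (k % dirs.length) "" := by
        have := hd 0 (by simp)
        simpa using this
      have hnext : nodeAt dirs inst c0 (k + 1) = wstep inst cur (dirs.getD (k % dirs.length) "") := by
        simp [nodeAt, hnode]
      obtain ⟨nxt, hnxt⟩ := nodeAt_isSome_of_le dirs inst c0 (show k + 1 ≤ m by omega) hm
      have hstep : wstep inst cur (dirs.getD (k % dirs.length) "") = some nxt := by
        rw [← hnext]; exact hnxt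
      have hdrest : ∀ t < rest.length, rest.getD t "" = dirs.getD ((k + 1 + t) % dirs.length) "" := by
        intro t ht
        have h2 := hd (t + 1) (by simp; omega)
        rw [show k + (t + 1) = k + 1 + t by omega] at h2
        simpa using h2
      have ihr := ih (k + 1) (j + 1) nxt hdrest hnxt (by omega)
      have hcast : ((j : Int) + 1) = ((j + 1 : Nat) : Int) := by push_cast; ring
      rw [show solveInner inst target_node (d :: rest) cur (j : Int) =
            solveInner inst target_node rest nxt ((j : Int) + 1) by
        simp only [solveInner, hd0]
        rw [if_neg (by simpa using hcur)]
        rw [show ((PySem.Dict.mk inst).get? cur).bind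
              (fun row => (PySem.Dict.mk row).get? (dirs.getD (k % dirs.length) "")) = some nxt from hstep]]
      rw [hcast, ihr]
      by_cases hlt : m < k + 1 + rest.length
      · rw [if_pos hlt, if_pos (by simp; omega)]
        congr 1
        omega
      · rw [if_neg hlt, if_neg (by simp; omega)]
        have h1 : k + 1 + rest.length = k + (d :: rest).length := by simp; omega
        rw [h1]
        congr 1
        simp
        omega

theorem outerA_eq (dirs : List String) (inst : List (String × List (String × String))) (c0 target_node : String)
    (m : Nat) (hm : nodeAt dirs inst c0 m = some target_node)
    (hmin : ∀ j < m, nodeAt dirs inst c0 j ≠ some target_node) :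
    ∀ (fuel k : Nat) (cur : String), k % dirs.length = 0 → nodeAt dirs inst c0 k = some cur →
      k ≤ m → m < k + fuel * dirs.length →
      solveRec dirs inst target_node fuel cur = ((m - k : Nat) : Int) := by
  intro fuel
  induction fuel with
  | zero => intro k cur _ _ hkm hbound; omega
  | succ fuel ih =>
    intro k cur hk0 hnode hkm hbound
    have hd : ∀ t < dirs.length, dirs.getD t "" = dirs.getD ((k + t) % dirs.length) "" := by
      intro t ht
      have hmod : (k + t) % dirs.length = t := by
        simp [Nat.add_mod, hk0, Nat.mod_eq_of_lt ht]
      rw [hmod]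
    have hinner := innerA_eq dirs inst c0 target_node m hm hmin dirs k 0 cur hd hnode hkm
    simp only [Nat.cast_zero] at hinner
    by_cases hlt : m < k + dirs.length
    · rw [if_pos hlt] at hinner
      simp only [solveRec, hinner]
      norm_num
    · rw [if_neg hlt] at hinner
      obtain ⟨cur', hcur'⟩ := nodeAt_isSome_of_le dirs inst c0 (show k + dirs.length ≤ m by omega) hm
      have ihr := ih (k + dirs.length) cur' (by rw [Nat.add_mod_right]; exact hk0) hcur' (by omega) (by
        have : (fuel + 1) * dirs.length = fuel * dirs.length + dirs.length := by ring
        omega)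
      simp only [solveRec, hinner, hcur', Option.getD_some, ihr]
      push_cast
      omega

theorem loopB_eq (dirs : List String) (inst : List (String × List (String × String))) (c0 target_node : String)
    (m : Nat) (hm : nodeAt dirs inst c0 m = some target_node)
    (hmin : ∀ j < m, nodeAt dirs inst c0 j ≠ some target_node) :
    ∀ (fuel k : Nat) (cur : String), nodeAt dirs inst c0 k = some cur → k ≤ m → m < k + fuel →
      solveLoop dirs inst target_node fuel (k : Int) cur = (m : Int) := by
  intro fuel
  induction fuel with
  | zero => intro k cur _ hkm hbound; omega
  | succ fuel ih =>
    intro k cur hnode hkm hbound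
    by_cases hcur : cur = target_node
    · subst hcur
      have hmk : m = k := by
        by_contra hne
        exact hmin k (by omega) hnode
      subst hmk
      simp [solveLoop]
    · have hknem : k ≠ m := by
        intro h; subst h; rw [hm] at hnode; exact hcur (Option.some.inj hnode).symm
      have hnext : nodeAt dirs inst c0 (k + 1) = wstep inst cur (dirs.getD (k % dirs.length) "") := by
        simp [nodeAt, hnode]
      obtain ⟨nxt, hnxt⟩ := nodeAt_isSome_of_le dirs inst c0 (show k + 1 ≤ m by omega) hm
      have hstep : wstep inst cur (dirs.getD (k % dirs.length) "") = some nxt := by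
        rw [← hnext]; exact hnxt
      have hidx : PySem.List.pyGetD dirs (PySem.Int.mod (k : Int) (dirs.length : Int)) "" =
          dirs.getD (k % dirs.length) "" := by
        rw [PySem.Int.mod_natCast, PySem.List.pyGetD_natCast]
      simp only [solveLoop]
      rw [if_neg (by simpa using hcur)]
      rw [hidx]
      rw [show ((PySem.Dict.mk inst).get? cur).bind
            (fun row => (PySem.Dict.mk row).get? (dirs.getD (k % dirs.length) "")) = some nxt from hstep]
      have hcast : ((k : Int) + 1) = ((k + 1 : Nat) : Int) := by push_cast; ring
      rw [hcast]
      exact ih (k + 1) nxt hnxt (by omega) (by omega)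

-- ===== VERDICT (by name: the statement is the Claim_ definition above) =====
theorem solve_spec : Claim_equal_solve := by
  intro dirs inst current_node target_node _ hpre
  obtain ⟨hne, k0, hk0mem, hk0⟩ := hpre
  have hL : 0 < dirs.length := List.length_pos_iff.mpr hne
  have hex : ∃ k, nodeAt dirs inst current_node k = some target_node := ⟨k0, hk0⟩
  set m := Nat.find hex with hmdef
  have hm : nodeAt dirs inst current_node m = some target_node := Nat.find_spec hex
  have hmin : ∀ j < m, nodeAt dirs inst current_node j ≠ some target_node := fun j hj => Nat.find_min hex hj
  have hk0b : k0 < (inst.length + 1) * dirs.length + 1 := List.mem_range.mp hk0mem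
  have hmk0 : m ≤ k0 := Nat.find_min' hex hk0
  have hmb : m ≤ (inst.length + 1) * dirs.length := by omega
  unfold Spec_solve solve solve_alt
  have ha := outerA_eq dirs inst current_node target_node m hm hmin
    ((inst.length + 1) * dirs.length + 2) 0 current_node (by simp) rfl (by omega)
    (by
      have h1 : ((inst.length + 1) * dirs.length + 2) * dirs.length
          = (inst.length + 1) * dirs.length * dirs.length + 2 * dirs.length := by ring
      have h2 : (inst.length + 1) * dirs.length ≤ (inst.length + 1) * dirs.length * dirs.length :=
        Nat.le_mul_of_pos_right _ hL
      omega)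
  have hb := loopB_eq dirs inst current_node target_node m hm hmin
    ((inst.length + 1) * dirs.length + 1) 0 current_node rfl (by omega) (by omega)
  rw [ha]
  rw [show ((0 : Nat) : Int) = (0 : Int) by simp] at hb
  rw [hb]
  simp

theorem solve_raises : Claim_raises_solve := by
  unfold Claim_raises_solve
  constructor
  · intro dirs inst current_node target_node _ hr hpre
    exact hpre.1 hr.1
  · exact ⟨by decide, by decide, by decide⟩

-- self-check: the raise-region witness indeed falls outside Pre_solve
theorem pvRaiseWitness_outside_pre_ok :
    ¬ Pre_solve pvRaiseWitness_solve.1 pvRaiseWitness_solve.2.1 pvRaiseWitness_solve.2.2.1 pvRaiseWitness_solve.2.2.2 := by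
  have h := solve_raises
  unfold Claim_raises_solve at h
  exact h.1 _ _ _ _ (by decide) (by decide)
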